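-- pv_equiv track=rewrite | github.com/gkpotter/Advent-of-Code-2020 | days/day_24/main.py | part_two
-- ===== SOURCE A (Python) =====
-- def get_neighbors(tile):
-- 	(x,y) = tile
--
-- 	neighbors = [
-- 		(x+2,y),
-- 		(x-2,y),
-- 		(x-1,y+1),
-- 		(x-1,y-1),
-- 		(x+1,y+1),
-- 		(x+1,y-1),
-- 	]
--
-- 	return neighbors
--
-- def part_two(tiles):
-- 	grid = {}
-- 	for tile in tiles:
-- 		grid[tile] = True
--
-- 	for i in range(100):
-- 		updated_grid = {}
-- 		adjacent = {}
--
-- 		for tile in grid: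
-- 			neighbors = get_neighbors(tile)
-- 			b = 0
--
-- 			for neighbor in neighbors:
-- 				if neighbor not in grid:
-- 					if neighbor in adjacent:
-- 						adjacent[neighbor] += 1
-- 					else:
-- 						adjacent[neighbor] = 1
-- 				else:
-- 					b += 1
--
-- 			if b in [1,2]:
-- 				updated_grid[tile] = True
--
-- 		for tile in adjacent:
-- 			if adjacent[tile] == 2:
-- 				updated_grid[tile] = True
--
-- 		grid = updated_grid
--
-- 	return len(grid)
-- ===== SOURCE B (Python) =====
-- def part_two(tiles):
-- 	active = sorted(set(tiles))
-- 	for _ in range(100):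
-- 		marks = 7 * active + [(x + dx, y + dy) for (x, y) in active
-- 		        for (dx, dy) in ((2, 0), (-2, 0), (-1, 1), (-1, -1), (1, 1), (1, -1))]
-- 		marks.sort()
-- 		nxt = []
-- 		cur = None
-- 		c = 0
-- 		for t in marks:
-- 			if t == cur:
-- 				c += 1
-- 			else:
-- 				if c in (2, 8, 9):
-- 					nxt.append(cur)
-- 				cur = t
-- 				c = 1
-- 		if c in (2, 8, 9):
-- 			nxt.append(cur)
-- 		active = nxt
-- 	return len(active)
-- ===== Notes on version B (the rewrite author's own statement) =====
-- stated objective: alternative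
-- what changed: B keeps no dicts or per-tile counters at all: each step it emits every live tile 7 times plus its six neighbour tiles once each into one list, sorts it, and a single run-length scan keeps exactly the tiles whose run length is 2, 8 or 9 (dead with two live neighbours, or live with one or two), replacing A's two scatter-updated bookkeeping dicts with sort-and-scan.
import Mathlib
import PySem

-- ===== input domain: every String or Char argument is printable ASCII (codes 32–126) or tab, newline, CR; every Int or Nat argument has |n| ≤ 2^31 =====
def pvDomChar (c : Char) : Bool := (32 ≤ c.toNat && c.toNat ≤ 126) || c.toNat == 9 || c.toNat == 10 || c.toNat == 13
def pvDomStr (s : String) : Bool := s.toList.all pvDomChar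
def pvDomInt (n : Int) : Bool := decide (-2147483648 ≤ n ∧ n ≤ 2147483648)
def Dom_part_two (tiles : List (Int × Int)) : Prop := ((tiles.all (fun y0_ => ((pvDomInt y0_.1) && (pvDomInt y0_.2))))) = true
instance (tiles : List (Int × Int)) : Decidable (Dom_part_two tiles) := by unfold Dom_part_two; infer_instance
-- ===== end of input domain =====

-- B replaces A's per-step dict bookkeeping by sorting: each live tile is emitted 7 times plus
-- its six neighbour tiles once each, the list is sorted and scanned once, and a tile is kept
-- exactly when its run length is 2, 8 or 9 (objective: alternative).
-- Python dicts/sets are ported as Std.HashMap / sorted lists (CPython's dict is a hash map);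
-- the returned count does not depend on dict iteration order.

-- ===== PORT A =====
def get_neighbors (tile : Int × Int) : List (Int × Int) :=
  [(tile.1 + 2, tile.2), (tile.1 - 2, tile.2), (tile.1 - 1, tile.2 + 1),
   (tile.1 - 1, tile.2 - 1), (tile.1 + 1, tile.2 + 1), (tile.1 + 1, tile.2 - 1)]

-- one iteration of A's `for i in range(100)` body
def partTwoStepA (grid : Std.HashMap (Int × Int) Bool) : Std.HashMap (Int × Int) Bool :=
  let p := grid.keys.foldl
    (fun (acc : Std.HashMap (Int × Int) Bool × Std.HashMap (Int × Int) Int) tile =>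
      let r := (get_neighbors tile).foldl
        (fun (s : Std.HashMap (Int × Int) Int × Int) neighbor =>
          if !grid.contains neighbor then
            (if s.1.contains neighbor then s.1.insert neighbor (s.1.getD neighbor 0 + 1)
             else s.1.insert neighbor 1, s.2)
          else (s.1, s.2 + 1))
        (acc.2, (0 : Int))
      (if r.2 = 1 ∨ r.2 = 2 then acc.1.insert tile true else acc.1, r.1))
    (∅, ∅)
  p.2.keys.foldl (fun ug tile => if p.2.getD tile 0 = 2 then ug.insert tile true else ug) p.1

def part_two (tiles : List (Int × Int)) : Int :=
  let grid := tiles.foldl (fun g t => g.insert t true) (∅ : Std.HashMap (Int × Int) Bool)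
  let final := (PySem.List.pyRange 0 100 1).foldl (fun g _ => partTwoStepA g) grid
  (final.size : Int)

-- ===== PORT B =====
-- Python's `<` on int pairs (lexicographic), as a ≤-test for sorting
def lexLe (a b : Int × Int) : Bool := decide (a.1 < b.1 ∨ (a.1 = b.1 ∧ a.2 ≤ b.2))

-- `if c in (2, 8, 9): nxt.append(cur)` — cur is never None when the test holds
def sealB (st : Option (Int × Int) × Int × List (Int × Int)) : List (Int × Int) :=
  if st.2.1 = 2 ∨ st.2.1 = 8 ∨ st.2.1 = 9 then st.2.2 ++ st.1.toList else st.2.2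

-- the body of `for t in marks: …`
def runStepB (st : Option (Int × Int) × Int × List (Int × Int)) (t : Int × Int) :
    Option (Int × Int) × Int × List (Int × Int) :=
  if st.1 == some t then (st.1, st.2.1 + 1, st.2.2)
  else (some t, 1, sealB st)

-- one iteration of Source B's `for _ in range(100)` body
def stepB (active : List (Int × Int)) : List (Int × Int) :=
  let marks := PySem.List.pyRepeat active 7
    ++ active.flatMap (fun t =>
        ([((2 : Int), (0 : Int)), (-2, 0), (-1, 1), (-1, -1), (1, 1), (1, -1)]).map
          (fun d => (t.1 + d.1, t.2 + d.2)))
  let ms := marks.mergeSort lexLe          -- marks.sort()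
  sealB (ms.foldl runStepB ((none, 0, []) : Option (Int × Int) × Int × List (Int × Int)))

def part_two_alt (tiles : List (Int × Int)) : Int :=
  let active := (PySem.Set.ofList tiles).mergeSort lexLe     -- sorted(set(tiles))
  (((PySem.List.pyRange 0 100 1).foldl (fun a _ => stepB a) active).length : Int)

-- ===== PRECONDITION & SPEC =====
def Spec_part_two (tiles : List (Int × Int)) (out : Int) : Prop := out = part_two_alt tiles
instance (tiles : List (Int × Int)) (out : Int) : Decidable (Spec_part_two tiles out) := by unfold Spec_part_two; infer_instance

-- ===== CLAIM (what is proved, stated in full; the proofs are below) =====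
def Claim_equal_part_two : Prop := ∀ (tiles : List (Int × Int)), Dom_part_two tiles → Spec_part_two tiles (part_two tiles)

-- ===== LEMMAS AND PROOFS =====

-- number of live neighbours of t when the live tiles are exactly the list s
def liveNbrCount (s : List (Int × Int)) (t : Int × Int) : Nat :=
  (get_neighbors t).countP (fun n => decide (n ∈ s))

theorem nodup_get_neighbors (t : Int × Int) : (get_neighbors t).Nodup := by
  simp [get_neighbors, Prod.ext_iff]
  omega

theorem mem_get_neighbors_symm (t u : Int × Int) :
    t ∈ get_neighbors u ↔ u ∈ get_neighbors t := by
  simp [get_neighbors, Prod.ext_iff]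
  omega

theorem count_of_nodup {α : Type} [BEq α] [LawfulBEq α] (l : List α) (h : l.Nodup) (a : α) :
    l.count a = if a ∈ l then 1 else 0 := by
  by_cases hm : a ∈ l
  · simp only [hm, if_true]
    exact le_antisymm (List.nodup_iff_count_le_one.mp h a) (List.count_pos_iff.mpr hm)
  · simp [hm, List.count_eq_zero.mpr hm]

theorem countP_mem_comm (l₁ l₂ : List (Int × Int)) (h₁ : l₁.Nodup) (h₂ : l₂.Nodup) :
    l₁.countP (fun x => decide (x ∈ l₂)) = l₂.countP (fun x => decide (x ∈ l₁)) := by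
  rw [List.countP_eq_length_filter, List.countP_eq_length_filter]
  apply List.Perm.length_eq
  rw [List.perm_ext_iff_of_nodup (h₁.filter _) (h₂.filter _)]
  intro a
  simp only [List.mem_filter, decide_eq_true_eq]
  exact and_comm

-- count in a flatMap of (filtered) neighbour lists = countP of "t is a neighbour of"
theorem count_flatMap_filter (q : (Int × Int) → Bool) (l : List (Int × Int)) (t : Int × Int) :
    (l.flatMap (fun u => (get_neighbors u).filter q)).count t
      = if q t then l.countP (fun u => decide (t ∈ get_neighbors u)) else 0 := by
  induction l with
  | nil => simp
  | cons u l ih =>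
    rw [List.flatMap_cons, List.count_append, ih, List.countP_cons]
    have hfc : ((get_neighbors u).filter q).count t
        = if q t ∧ t ∈ get_neighbors u then 1 else 0 := by
      rw [count_of_nodup _ ((nodup_get_neighbors u).filter q) t]
      simp [List.mem_filter, and_comm]
    rw [hfc]
    by_cases hq : q t <;> by_cases hm : t ∈ get_neighbors u <;> simp [hq, hm] <;> omega

theorem count_flatMap (l : List (Int × Int)) (t : Int × Int) :
    (l.flatMap get_neighbors).count t = l.countP (fun u => decide (t ∈ get_neighbors u)) := by
  have h := count_flatMap_filter (fun _ => true) l t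
  simpa using h

theorem countP_nbr_eq_liveNbrCount (s : List (Int × Int)) (hs : s.Nodup) (t : Int × Int) :
    s.countP (fun u => decide (t ∈ get_neighbors u)) = liveNbrCount s t := by
  unfold liveNbrCount
  rw [List.countP_congr (l := s) (p := fun u => decide (t ∈ get_neighbors u))
        (q := fun u => decide (u ∈ get_neighbors t)) (by intro x _; simp [mem_get_neighbors_symm])]
  exact countP_mem_comm s (get_neighbors t) hs (nodup_get_neighbors t)

theorem liveNbrCount_le_six (s : List (Int × Int)) (t : Int × Int) :
    liveNbrCount s t ≤ 6 := by
  have h := List.countP_le_length (l := get_neighbors t) (p := fun n => decide (n ∈ s))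
  simpa [get_neighbors] using h

theorem liveNbrCount_congr (l₁ l₂ : List (Int × Int)) (h : ∀ t, t ∈ l₁ ↔ t ∈ l₂)
    (t : Int × Int) : liveNbrCount l₁ t = liveNbrCount l₂ t := by
  unfold liveNbrCount
  exact List.countP_congr (by intro x _; simp [h x])

-- ---- generic HashMap fold lemmas ----

theorem keys_nodup (m : Std.HashMap (Int × Int) Bool) : m.keys.Nodup := by
  have h := Std.HashMap.distinct_keys (m := m)
  exact h.imp (by intro a b hab; simpa using hab)

theorem mem_cond_insert_fold (cond : (Int × Int) → Prop) [DecidablePred cond]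
    (l : List (Int × Int)) (init : Std.HashMap (Int × Int) Bool) (t : Int × Int) :
    (t ∈ l.foldl (fun ug x => if cond x then ug.insert x true else ug) init)
      ↔ t ∈ init ∨ (t ∈ l ∧ cond t) := by
  induction l generalizing init with
  | nil => simp
  | cons x l ih =>
    rw [List.foldl_cons]
    by_cases hc : cond x
    · rw [if_pos hc, ih]
      rw [Std.HashMap.mem_insert]
      simp only [List.mem_cons, beq_iff_eq]
      constructor
      · rintro ((rfl | h) | ⟨hm, hp⟩)
        · exact Or.inr ⟨Or.inl rfl, hc⟩
        · exact Or.inl h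
        · exact Or.inr ⟨Or.inr hm, hp⟩
      · rintro (h | ⟨(rfl | hm), hp⟩)
        · exact Or.inl (Or.inr h)
        · exact Or.inl (Or.inl rfl)
        · exact Or.inr ⟨hm, hp⟩
    · rw [if_neg hc, ih]
      simp only [List.mem_cons]
      constructor
      · rintro (h | ⟨hm, hp⟩)
        · exact Or.inl h
        · exact Or.inr ⟨Or.inr hm, hp⟩
      · rintro (h | ⟨(rfl | hm), hp⟩)
        · exact Or.inl h
        · exact absurd hp hc
        · exact Or.inr ⟨hm, hp⟩

theorem getD_incr_fold (slots : List (Int × Int)) (a0 : Std.HashMap (Int × Int) Int)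
    (t : Int × Int) :
    (slots.foldl (fun a n => a.insert n (a.getD n 0 + 1)) a0).getD t 0
      = a0.getD t 0 + (slots.count t : Int) := by
  induction slots generalizing a0 with
  | nil => simp
  | cons n l ih =>
    rw [List.foldl_cons, ih, Std.HashMap.getD_insert, List.count_cons]
    by_cases h : n = t
    · subst h; simp; push_cast; ring
    · simp [h, Ne.symm h]

theorem mem_incr_fold (slots : List (Int × Int)) (a0 : Std.HashMap (Int × Int) Int)
    (t : Int × Int) :
    (t ∈ slots.foldl (fun a n => a.insert n (a.getD n 0 + 1)) a0) ↔ t ∈ a0 ∨ t ∈ slots := by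
  induction slots generalizing a0 with
  | nil => simp
  | cons n l ih =>
    rw [List.foldl_cons, ih, Std.HashMap.mem_insert]
    simp only [List.mem_cons, beq_iff_eq]
    tauto

theorem mem_insert_true_fold (l : List (Int × Int)) (init : Std.HashMap (Int × Int) Bool)
    (t : Int × Int) :
    (t ∈ l.foldl (fun g x => g.insert x true) init) ↔ t ∈ init ∨ t ∈ l := by
  induction l generalizing init with
  | nil => simp
  | cons x l ih =>
    rw [List.foldl_cons, ih, Std.HashMap.mem_insert]
    simp only [List.mem_cons, beq_iff_eq]
    tauto

-- ---- A's step, characterised ----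

-- A's inner neighbour loop, decomposed
theorem innerA (g : Std.HashMap (Int × Int) Bool) (nl : List (Int × Int))
    (adj : Std.HashMap (Int × Int) Int) (b0 : Int) :
    nl.foldl
      (fun (s : Std.HashMap (Int × Int) Int × Int) neighbor =>
        if !g.contains neighbor then
          (if s.1.contains neighbor then s.1.insert neighbor (s.1.getD neighbor 0 + 1)
           else s.1.insert neighbor 1, s.2)
        else (s.1, s.2 + 1))
      (adj, b0)
      = ((nl.filter (fun n => !g.contains n)).foldl
           (fun a n => a.insert n (a.getD n 0 + 1)) adj,
         b0 + (nl.countP (fun n => g.contains n) : Int)) := by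
  induction nl generalizing adj b0 with
  | nil => simp
  | cons n nl ih =>
    rw [List.foldl_cons, List.filter_cons, List.countP_cons]
    by_cases hc : g.contains n
    · simp only [hc, Bool.not_true, Bool.false_eq_true, if_false]
      rw [ih]
      refine Prod.ext rfl ?_
      simp only [if_pos]
      push_cast
      ring
    · have hupd : (if adj.contains n then adj.insert n (adj.getD n 0 + 1)
                   else adj.insert n 1) = adj.insert n (adj.getD n 0 + 1) := by
        by_cases ha : adj.contains n
        · rw [if_pos ha]
        · rw [if_neg (by simp [ha]),
              Std.HashMap.getD_eq_fallback (by simp [Std.HashMap.mem_iff_contains, ha])]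
          norm_num
      simp only [hc, Bool.not_false, if_true, hupd]
      rw [ih]
      simp [hc]

-- A's first loop over the grid's tiles, decomposed into the survivors fold and the slot counter
theorem loop1A (g : Std.HashMap (Int × Int) Bool) (l : List (Int × Int))
    (ug : Std.HashMap (Int × Int) Bool) (adj : Std.HashMap (Int × Int) Int) :
    l.foldl
      (fun (acc : Std.HashMap (Int × Int) Bool × Std.HashMap (Int × Int) Int) tile =>
        let r := (get_neighbors tile).foldl
          (fun (s : Std.HashMap (Int × Int) Int × Int) neighbor =>
            if !g.contains neighbor then
              (if s.1.contains neighbor then s.1.insert neighbor (s.1.getD neighbor 0 + 1)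
               else s.1.insert neighbor 1, s.2)
            else (s.1, s.2 + 1))
          (acc.2, (0 : Int))
        (if r.2 = 1 ∨ r.2 = 2 then acc.1.insert tile true else acc.1, r.1))
      (ug, adj)
      = (l.foldl
           (fun ug tile =>
             if ((get_neighbors tile).countP (fun n => g.contains n) : Int) = 1
                ∨ ((get_neighbors tile).countP (fun n => g.contains n) : Int) = 2
             then ug.insert tile true else ug) ug,
         (l.flatMap (fun tile => (get_neighbors tile).filter (fun n => !g.contains n))).foldl
           (fun a n => a.insert n (a.getD n 0 + 1)) adj) := by
  induction l generalizing ug adj with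
  | nil => simp
  | cons tile l ih =>
    simp only [List.foldl_cons, List.flatMap_cons, List.foldl_append]
    rw [innerA]
    simp only [zero_add]
    exact ih _ _

-- the list of incremented (inactive) neighbour slots A builds
def adjSlots (g : Std.HashMap (Int × Int) Bool) : List (Int × Int) :=
  g.keys.flatMap (fun tile => (get_neighbors tile).filter (fun n => !g.contains n))

theorem contains_eq_decide_mem_keys (g : Std.HashMap (Int × Int) Bool) :
    (fun n => g.contains n) = (fun n => decide (n ∈ g.keys)) := by
  funext n
  cases h : g.contains n
  · simp [Std.HashMap.mem_keys, Std.HashMap.mem_iff_contains, h]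
  · simp [Std.HashMap.mem_keys, Std.HashMap.mem_iff_contains, h]

theorem count_adjSlots (g : Std.HashMap (Int × Int) Bool) (t : Int × Int) :
    (adjSlots g).count t = if g.contains t then 0 else liveNbrCount g.keys t := by
  unfold adjSlots
  rw [count_flatMap_filter, countP_nbr_eq_liveNbrCount g.keys (keys_nodup g)]
  by_cases hc : g.contains t <;> simp [hc]

theorem mem_adjSlots_not_contains (g : Std.HashMap (Int × Int) Bool) (t : Int × Int)
    (h : t ∈ adjSlots g) : g.contains t = false := by
  unfold adjSlots at h
  simp only [List.mem_flatMap, List.mem_filter] at h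
  obtain ⟨u, _, _, hni⟩ := h
  simpa using hni

theorem mem_stepA (g : Std.HashMap (Int × Int) Bool) (t : Int × Int) :
    t ∈ partTwoStepA g
      ↔ ((t ∈ g ∧ (liveNbrCount g.keys t = 1 ∨ liveNbrCount g.keys t = 2))
         ∨ (t ∉ g ∧ liveNbrCount g.keys t = 2)) := by
  unfold partTwoStepA
  rw [loop1A]
  simp only
  have hadj : (g.keys.flatMap (fun tile => (get_neighbors tile).filter (fun n => !g.contains n)))
      = adjSlots g := rfl
  rw [hadj]
  rw [mem_cond_insert_fold
    (cond := fun tile => (((adjSlots g).foldl (fun a n => a.insert n (a.getD n 0 + 1))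
        (∅ : Std.HashMap (Int × Int) Int)).getD tile 0 = 2)),
    mem_cond_insert_fold
    (cond := fun tile => ((get_neighbors tile).countP (fun n => g.contains n) : Int) = 1
       ∨ ((get_neighbors tile).countP (fun n => g.contains n) : Int) = 2)]
  have hgetD : ∀ u, ((adjSlots g).foldl (fun a n => a.insert n (a.getD n 0 + 1))
      (∅ : Std.HashMap (Int × Int) Int)).getD u 0 = ((adjSlots g).count u : Int) := by
    intro u
    rw [getD_incr_fold]
    simp
  have hkeysmem : ∀ u, u ∈ ((adjSlots g).foldl (fun a n => a.insert n (a.getD n 0 + 1))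
      (∅ : Std.HashMap (Int × Int) Int)).keys ↔ u ∈ adjSlots g := by
    intro u
    rw [Std.HashMap.mem_keys, mem_incr_fold]
    simp
  have hcountP : ∀ u, (get_neighbors u).countP (fun n => g.contains n)
      = liveNbrCount g.keys u := by
    intro u
    rw [contains_eq_decide_mem_keys]
    rfl
  constructor
  · rintro ((h | ⟨hmem, hcond⟩) | ⟨hmem, hcond⟩)
    · simp at h
    · rw [hcountP t] at hcond
      refine Or.inl ⟨by rwa [← Std.HashMap.mem_keys], by omega⟩
    · rw [hkeysmem t] at hmem
      rw [hgetD t, count_adjSlots] at hcond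
      have hnc : g.contains t = false := mem_adjSlots_not_contains g t hmem
      rw [hnc] at hcond
      simp only [Bool.false_eq_true, if_false] at hcond
      exact Or.inr ⟨by simp [Std.HashMap.mem_iff_contains, hnc], by omega⟩
  · rintro (⟨hmem, hcond⟩ | ⟨hmem, hcond⟩)
    · refine Or.inl (Or.inr ⟨by rwa [Std.HashMap.mem_keys], ?_⟩)
      rw [hcountP t]
      omega
    · have hnc : g.contains t = false := by
        simp only [Std.HashMap.mem_iff_contains] at hmem
        simpa using hmem
      refine Or.inr ⟨?_, ?_⟩
      · rw [hkeysmem t]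
        have hcnt := count_adjSlots g t
        rw [hnc] at hcnt
        simp only [Bool.false_eq_true, if_false] at hcnt
        exact List.count_pos_iff.mp (by omega)
      · rw [hgetD t, count_adjSlots, hnc]
        simp only [Bool.false_eq_true, if_false]
        omega

-- ---- B's step, characterised ----

theorem lexLe_total (a b : Int × Int) : lexLe a b = true ∨ lexLe b a = true := by
  simp only [lexLe, decide_eq_true_eq]
  omega

theorem lexLe_trans (a b c : Int × Int) (h₁ : lexLe a b = true) (h₂ : lexLe b c = true) :
    lexLe a c = true := by
  simp only [lexLe, decide_eq_true_eq] at *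
  omega

theorem lexLe_antisymm (a b : Int × Int) (h₁ : lexLe a b = true) (h₂ : lexLe b a = true) :
    a = b := by
  simp only [lexLe, decide_eq_true_eq] at *
  rcases a with ⟨a1, a2⟩
  rcases b with ⟨b1, b2⟩
  simp only [Prod.mk.injEq]
  constructor <;> omega

theorem count_cons_eq (a b : Int × Int) (l : List (Int × Int)) :
    (b :: l).count a = l.count a + if b = a then 1 else 0 := by
  simp [List.count_cons]

-- the run-length scan over a lexLe-sorted list keeps exactly the values whose count is 2, 8 or 9
theorem runAux (l : List (Int × Int)) (v : Int × Int) (c : Int) (nxt : List (Int × Int))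
    (hsort : l.Pairwise (fun a b => lexLe a b = true))
    (hv : ∀ t ∈ l, lexLe v t = true) :
    ∃ out : List (Int × Int),
      sealB (l.foldl runStepB (some v, c, nxt)) = nxt ++ out ∧ out.Nodup ∧
      ∀ t, t ∈ out ↔
        ((t = v ∧ (c + (l.count v : Int) = 2 ∨ c + (l.count v : Int) = 8
            ∨ c + (l.count v : Int) = 9))
         ∨ (t ≠ v ∧ t ∈ l ∧ ((l.count t : Int) = 2 ∨ (l.count t : Int) = 8
            ∨ (l.count t : Int) = 9))) := by
  induction l generalizing v c nxt with
  | nil =>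
    refine ⟨if c = 2 ∨ c = 8 ∨ c = 9 then [v] else [], ?_, ?_, ?_⟩
    · simp only [List.foldl_nil, sealB]
      by_cases hS : c = 2 ∨ c = 8 ∨ c = 9 <;> simp [hS]
    · by_cases hS : c = 2 ∨ c = 8 ∨ c = 9 <;> simp [hS]
    · intro t
      by_cases hS : c = 2 ∨ c = 8 ∨ c = 9 <;> simp [hS] <;> tauto
  | cons t₀ l ih =>
    rw [List.foldl_cons]
    by_cases h0 : v = t₀
    · subst h0
      have hstep : runStepB (some v, c, nxt) v = (some v, c + 1, nxt) := by
        simp [runStepB]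
      rw [hstep]
      obtain ⟨out, heq, hnd, hmem⟩ := ih v (c + 1) nxt (hsort.of_cons)
        (fun t ht => (List.pairwise_cons.mp hsort).1 t ht)
      refine ⟨out, heq, hnd, fun t => ?_⟩
      rw [hmem t]
      constructor
      · rintro (⟨rfl, hc⟩ | ⟨hne, hmem', hc⟩)
        · refine Or.inl ⟨rfl, ?_⟩
          rw [count_cons_eq, if_pos rfl]
          push_cast at hc ⊢
          omega
        · refine Or.inr ⟨hne, List.mem_cons_of_mem _ hmem', ?_⟩
          rw [count_cons_eq, if_neg (fun h => hne h.symm)]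
          push_cast at hc ⊢
          omega
      · rintro (⟨rfl, hc⟩ | ⟨hne, hmem', hc⟩)
        · rw [count_cons_eq, if_pos rfl] at hc
          refine Or.inl ⟨rfl, ?_⟩
          push_cast at hc ⊢
          omega
        · rcases List.mem_cons.mp hmem' with rfl | hmem''
          · exact absurd rfl hne
          · refine Or.inr ⟨hne, hmem'', ?_⟩
            rw [count_cons_eq, if_neg (fun h => hne h.symm)] at hc
            push_cast at hc ⊢
            omega
    · have hstep : runStepB (some v, c, nxt) t₀ = (some t₀, 1, sealB (some v, c, nxt)) := by
        simp [runStepB, h0]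
      rw [hstep]
      have hvnot : v ∉ t₀ :: l := by
        intro hmem
        rcases List.mem_cons.mp hmem with rfl | hmem'
        · exact h0 rfl
        · exact h0 (lexLe_antisymm v t₀ (hv t₀ List.mem_cons_self)
            ((List.pairwise_cons.mp hsort).1 v hmem'))
      obtain ⟨out', heq, hnd, hmem⟩ := ih t₀ 1 (sealB (some v, c, nxt)) (hsort.of_cons)
        (fun t ht => (List.pairwise_cons.mp hsort).1 t ht)
      have hseal : sealB (some v, c, nxt)
          = nxt ++ (if c = 2 ∨ c = 8 ∨ c = 9 then [v] else []) := by
        simp only [sealB]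
        by_cases hS : c = 2 ∨ c = 8 ∨ c = 9 <;> simp [hS]
      refine ⟨(if c = 2 ∨ c = 8 ∨ c = 9 then [v] else []) ++ out', ?_, ?_, ?_⟩
      · rw [heq, hseal, List.append_assoc]
      · refine List.Nodup.append ?_ hnd ?_
        · by_cases hS : c = 2 ∨ c = 8 ∨ c = 9 <;> simp [hS]
        · intro x hx1 hx2
          by_cases hS : c = 2 ∨ c = 8 ∨ c = 9
          · rw [if_pos hS, List.mem_singleton] at hx1
            subst hx1
            rcases (hmem x).mp hx2 with ⟨rfl, _⟩ | ⟨_, hmem', _⟩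
            · exact h0 rfl
            · exact hvnot (List.mem_cons_of_mem _ hmem')
          · rw [if_neg hS] at hx1
            simp at hx1
      · intro t
        rw [List.mem_append, hmem t]
        have hcv : (t₀ :: l).count v = 0 := List.count_eq_zero.mpr hvnot
        constructor
        · rintro (hin | (⟨rfl, hc⟩ | ⟨hne, hmem', hc⟩))
          · by_cases hS : c = 2 ∨ c = 8 ∨ c = 9
            · rw [if_pos hS, List.mem_singleton] at hin
              subst hin
              exact Or.inl ⟨rfl, by rw [hcv]; push_cast; omega⟩
            · rw [if_neg hS] at hin
              simp at hin
          · refine Or.inr ⟨fun he => h0 he.symm, List.mem_cons_self, ?_⟩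
            rw [List.count_cons_self]
            push_cast
            push_cast at hc
            omega
          · have htne : t ≠ v := by
              rintro rfl
              exact hvnot (List.mem_cons_of_mem _ hmem')
            refine Or.inr ⟨htne, List.mem_cons_of_mem _ hmem', ?_⟩
            rwa [List.count_cons_of_ne (Ne.symm hne)]
        · rintro (⟨rfl, hc⟩ | ⟨hne, hmem', hc⟩)
          · rw [hcv] at hc
            push_cast at hc
            refine Or.inl ?_
            have hS : c = 2 ∨ c = 8 ∨ c = 9 := by omega
            rw [if_pos hS]
            exact List.mem_singleton.mpr rfl
          · rcases List.mem_cons.mp hmem' with rfl | hmem''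
            · refine Or.inr (Or.inl ⟨rfl, ?_⟩)
              rw [List.count_cons_self] at hc
              push_cast at hc ⊢
              omega
            · by_cases ht0 : t = t₀
              · subst ht0
                refine Or.inr (Or.inl ⟨rfl, ?_⟩)
                rw [List.count_cons_self] at hc
                push_cast at hc ⊢
                omega
              · refine Or.inr (Or.inr ⟨ht0, hmem'', ?_⟩)
                rwa [List.count_cons_of_ne (Ne.symm ht0)] at hc

theorem runSelect_spec (l : List (Int × Int))
    (hsort : l.Pairwise (fun a b => lexLe a b = true)) :
    (sealB (l.foldl runStepB (none, 0, []))).Nodup ∧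
    ∀ t, t ∈ sealB (l.foldl runStepB (none, 0, []))
      ↔ ((l.count t : Int) = 2 ∨ (l.count t : Int) = 8 ∨ (l.count t : Int) = 9) := by
  cases l with
  | nil =>
    constructor
    · simp [sealB]
    · intro t
      simp [sealB]
  | cons t₀ l =>
    rw [List.foldl_cons]
    have hstep : runStepB (none, 0, []) t₀ = (some t₀, 1, []) := by
      simp [runStepB, sealB]
    rw [hstep]
    obtain ⟨out, heq, hnd, hmem⟩ := runAux l t₀ 1 [] (hsort.of_cons)
      (fun t ht => (List.pairwise_cons.mp hsort).1 t ht)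
    rw [heq]
    simp only [List.nil_append]
    refine ⟨hnd, fun t => ?_⟩
    rw [hmem t]
    constructor
    · rintro (⟨rfl, hc⟩ | ⟨hne, hmem', hc⟩)
      · rw [List.count_cons_self]
        push_cast at hc ⊢
        omega
      · rwa [List.count_cons_of_ne (Ne.symm hne)]
    · intro hc
      by_cases ht0 : t = t₀
      · subst ht0
        rw [List.count_cons_self] at hc
        push_cast at hc ⊢
        exact Or.inl ⟨rfl, by omega⟩
      · rw [List.count_cons_of_ne (Ne.symm ht0)] at hc
        have hpos : 0 < l.count t := by omega
        exact Or.inr ⟨ht0, List.count_pos_iff.mp hpos, hc⟩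

-- the multiplicity of t in B's marks list
theorem count_marks (active : List (Int × Int)) (ha : active.Nodup) (t : Int × Int) :
    ((PySem.List.pyRepeat active 7
      ++ active.flatMap (fun u =>
          ([((2 : Int), (0 : Int)), (-2, 0), (-1, 1), (-1, -1), (1, 1), (1, -1)]).map
            (fun d => (u.1 + d.1, u.2 + d.2)))).count t : Int)
      = 7 * (if t ∈ active then 1 else 0) + (liveNbrCount active t : Int) := by
  rw [List.count_append]
  have h1 : (PySem.List.pyRepeat active 7).count t = 7 * active.count t := by
    simp only [PySem.List.pyRepeat, show ((7 : Int)).toNat = 7 from rfl]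
    simp [List.replicate, List.count_append]
    omega
  have h2 : (active.flatMap (fun u =>
      ([((2 : Int), (0 : Int)), (-2, 0), (-1, 1), (-1, -1), (1, 1), (1, -1)]).map
        (fun d => (u.1 + d.1, u.2 + d.2)))) = active.flatMap get_neighbors := by
    have hf : (fun u : Int × Int =>
        ([((2 : Int), (0 : Int)), (-2, 0), (-1, 1), (-1, -1), (1, 1), (1, -1)]).map
          (fun d => (u.1 + d.1, u.2 + d.2))) = get_neighbors := by
      funext u
      simp [get_neighbors, sub_eq_add_neg]
    rw [hf]
  rw [h1, h2, count_flatMap, countP_nbr_eq_liveNbrCount active ha,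
    count_of_nodup active ha t]
  by_cases hm : t ∈ active <;> simp [hm]

theorem mem_stepB (active : List (Int × Int)) (ha : active.Nodup) (t : Int × Int) :
    t ∈ stepB active
      ↔ (liveNbrCount active t = 2 ∨ (liveNbrCount active t = 1 ∧ t ∈ active)) := by
  unfold stepB
  simp only
  set marks := PySem.List.pyRepeat active 7
    ++ active.flatMap (fun u =>
        ([((2 : Int), (0 : Int)), (-2, 0), (-1, 1), (-1, -1), (1, 1), (1, -1)]).map
          (fun d => (u.1 + d.1, u.2 + d.2))) with hmarks
  have hsort : (marks.mergeSort lexLe).Pairwise (fun a b => lexLe a b = true) :=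
    List.pairwise_mergeSort lexLe_trans
      (fun a b => by rcases lexLe_total a b with h | h <;> simp [h]) marks
  obtain ⟨_, hmem⟩ := runSelect_spec (marks.mergeSort lexLe) hsort
  rw [hmem t, List.Perm.count_eq (List.mergeSort_perm marks lexLe),
    hmarks, count_marks active ha t]
  have hle := liveNbrCount_le_six active t
  by_cases hm : t ∈ active <;> simp [hm] <;> omega

theorem nodup_stepB (active : List (Int × Int)) : (stepB active).Nodup := by
  unfold stepB
  simp only
  apply (runSelect_spec _ (List.pairwise_mergeSort lexLe_trans
    (fun a b => by rcases lexLe_total a b with h | h <;> simp [h]) _)).1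

-- ---- the joint invariant and the main induction ----

def GoodPair (g : Std.HashMap (Int × Int) Bool) (s : List (Int × Int)) : Prop :=
  s.Nodup ∧ ∀ t, (t ∈ g) ↔ t ∈ s

theorem step_preserves (g : Std.HashMap (Int × Int) Bool) (s : List (Int × Int))
    (h : GoodPair g s) : GoodPair (partTwoStepA g) (stepB s) := by
  obtain ⟨hs, hm⟩ := h
  have hkeys : ∀ t, t ∈ g.keys ↔ t ∈ s := by
    intro t
    rw [Std.HashMap.mem_keys]
    exact hm t
  refine ⟨nodup_stepB s, fun t => ?_⟩
  rw [mem_stepA g t, mem_stepB s hs t, liveNbrCount_congr g.keys s hkeys t, hm t]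
  by_cases ht : t ∈ s
  · simp only [ht, true_and, and_true, not_true_eq_false, false_and, or_false]
    omega
  · simp only [ht, false_and, and_false, not_false_eq_true, true_and, false_or, or_false]

theorem size_eq_of_good (g : Std.HashMap (Int × Int) Bool) (s : List (Int × Int))
    (h : GoodPair g s) : (g.size : Int) = (s.length : Int) := by
  obtain ⟨hs, hm⟩ := h
  have hperm : g.keys.Perm s := by
    rw [List.perm_ext_iff_of_nodup (keys_nodup g) hs]
    intro t
    rw [Std.HashMap.mem_keys]
    exact hm t
  have h1 : g.keys.length = s.length := hperm.length_eq
  have h2 : g.keys.length = g.size := Std.HashMap.length_keys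
  omega

-- A's foldl over the step list agrees with B's foldl over the same list
theorem iterate_preserves (l : List Int) (g : Std.HashMap (Int × Int) Bool)
    (s : List (Int × Int)) (h : GoodPair g s) :
    GoodPair (l.foldl (fun g _ => partTwoStepA g) g) (l.foldl (fun a _ => stepB a) s) := by
  induction l generalizing g s with
  | nil => exact h
  | cons _ l ih => exact ih _ _ (step_preserves g s h)

theorem init_good (tiles : List (Int × Int)) :
    GoodPair (tiles.foldl (fun g t => g.insert t true) (∅ : Std.HashMap (Int × Int) Bool))
      ((PySem.Set.ofList tiles).mergeSort lexLe) := by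
  have hperm := List.mergeSort_perm (PySem.Set.ofList tiles) lexLe
  refine ⟨hperm.nodup_iff.mpr (PySem.Set.nodup_ofList _), fun t => ?_⟩
  rw [mem_insert_true_fold, hperm.mem_iff, PySem.Set.mem_ofList]
  simp

-- ===== VERDICT (by name: the statement is the Claim_ definition above) =====
theorem part_two_spec : Claim_equal_part_two := by
  intro tiles _
  unfold Spec_part_two part_two part_two_alt
  exact size_eq_of_good _ _
    (iterate_preserves (PySem.List.pyRange 0 100 1) _ _ (init_good tiles))
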